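-- pv_equiv track=rewrite | github.com/SiyuanLIU739/MyCodeBook | LeetCode/Python/Q2341.py | seekTime
-- ===== SOURCE A (Python) =====
-- def seekTime(garbage, travel, char):
--     currentLoc = 0
--     ans = 0
--
--     for i in range(len(garbage)):
--         if(char in garbage[i]):
--             while(currentLoc < i):
--                 ans += travel[currentLoc]
--                 currentLoc += 1
--
--             ans += garbage[i].count(char)
--
--     return ans
-- ===== SOURCE B (Python) =====
-- def seekTime(garbage, travel, char):
--     last = 0
--     for i, g in enumerate(garbage):
--         if char in g:
--             last = i
--     return sum(g.count(char) for g in garbage) + sum(travel[:last])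
-- ===== Notes on version B (the rewrite author's own statement) =====
-- stated objective: simpler
-- what changed: Replaced the interleaved monotonic-pointer loop (advancing currentLoc with an inner while that drains travel costs) by two independent aggregates: the total substring count over all houses plus the sum of the travel-prefix slice up to the last house containing char.
import Mathlib
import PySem

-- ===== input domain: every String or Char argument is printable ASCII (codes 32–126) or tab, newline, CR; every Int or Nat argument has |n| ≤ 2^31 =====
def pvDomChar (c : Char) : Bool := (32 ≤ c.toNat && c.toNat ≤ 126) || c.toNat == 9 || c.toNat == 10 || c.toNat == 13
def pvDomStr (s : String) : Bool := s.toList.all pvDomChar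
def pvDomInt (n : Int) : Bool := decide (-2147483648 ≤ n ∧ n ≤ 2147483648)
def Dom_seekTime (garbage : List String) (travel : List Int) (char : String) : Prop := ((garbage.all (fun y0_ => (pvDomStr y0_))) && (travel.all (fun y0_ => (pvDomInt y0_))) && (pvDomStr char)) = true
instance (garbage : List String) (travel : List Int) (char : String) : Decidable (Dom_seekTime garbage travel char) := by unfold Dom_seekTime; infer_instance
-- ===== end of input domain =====

-- B replaces A's interleaved pointer/while accumulation by two independent aggregates
-- (total count + travel-prefix sum up to the last matching house); objective: simpler.

-- ===== PORT A =====
-- the inner 'while(currentLoc < i): ans += travel[currentLoc]; currentLoc += 1'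
-- (travel[currentLoc] via pyGetD; Pre_ excludes the out-of-range accesses on which Python raises)
def seekTimeWhile (travel : List Int) (i cur : Nat) (ans : Int) : Nat × Int :=
  if cur < i then
    seekTimeWhile travel i (cur + 1) (ans + PySem.List.pyGetD travel (cur : Int) 0)
  else (cur, ans)
termination_by i - cur

def seekTime (garbage : List String) (travel : List Int) (char : String) : Int :=
  ((List.range garbage.length).foldl (fun st i =>
      if PySem.Str.isIn char (garbage.getD i "") then
        let st' := seekTimeWhile travel i st.1 st.2
        (st'.1, st'.2 + (PySem.Str.count (garbage.getD i "") char : Int))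
      else st) ((0 : Nat), (0 : Int))).2

-- ===== PORT B =====
def seekTime_alt (garbage : List String) (travel : List Int) (char : String) : Int :=
  let last := (PySem.List.enumerate garbage).foldl
      (fun l p => if PySem.Str.isIn char p.2 then p.1 else l) 0
  (garbage.map (fun g => (PySem.Str.count g char : Int))).sum
    + (PySem.List.slice travel none (some last)).sum

-- ===== PRECONDITION & SPEC =====
-- Pre_ excludes exactly the inputs on which Python A raises IndexError: a house with
-- index i > len(travel) containing char makes A read travel beyond its end
-- (B naturally returns the total count plus the clamped travel-prefix sum there).
def Pre_seekTime (garbage : List String) (travel : List Int) (char : String) : Prop :=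
  ∀ i, i < garbage.length → PySem.Str.isIn char (garbage.getD i "") = true → i ≤ travel.length
instance (garbage : List String) (travel : List Int) (char : String) : Decidable (Pre_seekTime garbage travel char) := by unfold Pre_seekTime; infer_instance

def pvWitness_seekTime : List String × List Int × String := (["ab", "b"], [3], "b")

def Spec_seekTime (garbage : List String) (travel : List Int) (char : String) (out : Int) : Prop := out = seekTime_alt garbage travel char
instance (garbage : List String) (travel : List Int) (char : String) (out : Int) : Decidable (Spec_seekTime garbage travel char out) := by unfold Spec_seekTime; infer_instance

-- ===== CLAIM (what is proved, stated in full; the proofs are below) =====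
def Claim_equal_seekTime : Prop := ∀ (garbage : List String) (travel : List Int) (char : String), Dom_seekTime garbage travel char → Pre_seekTime garbage travel char → Spec_seekTime garbage travel char (seekTime garbage travel char)

-- ===== LEMMAS AND PROOFS =====

-- A's "last matching index so far" state, as a fold over range n (0 when no match yet).
def lastA (garbage : List String) (char : String) (n : Nat) : Nat :=
  (List.range n).foldl (fun l i => if PySem.Str.isIn char (garbage.getD i "") then i else l) 0

-- total count over the first n houses
def cntA (garbage : List String) (char : String) (n : Nat) : Int :=
  ((garbage.take n).map (fun g => (PySem.Str.count g char : Int))).sum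

theorem take_succ_sum (xs : List Int) (n : Nat) :
    (xs.take (n + 1)).sum = (xs.take n).sum + PySem.List.pyGetD xs (n : Int) 0 := by
  rw [List.take_add_one, List.sum_append, PySem.List.pyGetD_natCast, List.getD_eq_getElem?_getD]
  cases xs[n]? <;> simp

theorem seekTimeWhile_eq (travel : List Int) :
    ∀ (fuel i cur : Nat) (ans : Int), i - cur = fuel → cur ≤ i →
      seekTimeWhile travel i cur ans
        = (i, ans + ((travel.take i).sum - (travel.take cur).sum)) := by
  intro fuel
  induction fuel with
  | zero =>
    intro i cur ans hf hle
    have : cur = i := by omega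
    subst this
    rw [seekTimeWhile]
    simp
  | succ m ih =>
    intro i cur ans hf hle
    have hlt : cur < i := by omega
    rw [seekTimeWhile, if_pos hlt, ih i (cur + 1) _ (by omega) (by omega)]
    rw [take_succ_sum travel cur]
    ring_nf

theorem count_go_of_not_infix (sub : List Char) (_hsub : sub ≠ []) :
    ∀ (fuel : Nat) (l : List Char) (acc : Nat), ¬ sub <:+: l →
      PySem.Chars.count.go sub fuel l acc = acc := by
  intro fuel
  induction fuel with
  | zero => intro l acc _; rw [PySem.Chars.count.go]
  | succ m ih =>
    intro l acc h
    cases l with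
    | nil => rw [PySem.Chars.count.go]; omega
    | cons a t =>
      rw [PySem.Chars.count.go]
      have hpre : sub.isPrefixOf (a :: t) = false := by
        by_contra hc
        have : sub <+: (a :: t) := by
          have := eq_true_of_ne_false hc
          exact List.isPrefixOf_iff_prefix.mp this
        exact h this.isInfix
      rw [hpre]
      simp only [Bool.false_eq_true, if_false]
      exact ih t acc (fun hi => h (hi.trans (List.suffix_cons a t).isInfix))

theorem count_eq_zero_of_not_isIn (s sub : String)
    (h : PySem.Str.isIn sub s = false) : PySem.Str.count s sub = 0 := by
  have hinf : ¬ sub.toList <:+: s.toList := by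
    rw [PySem.Str.isIn_eq] at h
    exact Iff.mp (PySem.Chars.isIn_eq_false_iff sub.toList s.toList) h
  have hne : sub.toList ≠ [] := by
    intro hnil
    rw [PySem.Str.isIn_eq, hnil, PySem.Chars.isIn_nil] at h
    exact absurd h (by simp)
  rw [PySem.Str.count_eq, PySem.Chars.count]
  rw [if_neg (by simpa [List.isEmpty_iff] using hne)]
  exact count_go_of_not_infix sub.toList hne _ _ 0 hinf

theorem lastA_succ (garbage : List String) (char : String) (n : Nat) :
    lastA garbage char (n + 1)
      = if PySem.Str.isIn char (garbage.getD n "") then n else lastA garbage char n := by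
  unfold lastA
  rw [List.range_succ, List.foldl_append]
  simp

theorem cntA_succ (garbage : List String) (char : String) (n : Nat) (hn : n < garbage.length) :
    cntA garbage char (n + 1)
      = cntA garbage char n + (PySem.Str.count (garbage.getD n "") char : Int) := by
  unfold cntA
  rw [List.take_add_one, List.map_append, List.sum_append,
      List.getD_eq_getElem?_getD, List.getElem?_eq_getElem hn]
  simp

theorem foldA_eq (garbage : List String) (travel : List Int) (char : String) :
    ∀ n, n ≤ garbage.length →
      lastA garbage char n ≤ n ∧
      (List.range n).foldl (fun st i =>
          if PySem.Str.isIn char (garbage.getD i "") then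
            let st' := seekTimeWhile travel i st.1 st.2
            (st'.1, st'.2 + (PySem.Str.count (garbage.getD i "") char : Int))
          else st) ((0 : Nat), (0 : Int))
        = (lastA garbage char n,
           cntA garbage char n + (travel.take (lastA garbage char n)).sum) := by
  intro n
  induction n with
  | zero => intro _; refine ⟨le_refl _, ?_⟩; simp [lastA, cntA]
  | succ m ih =>
    intro hm
    obtain ⟨hle, heq⟩ := ih (by omega)
    rw [List.range_succ, List.foldl_append]
    simp only [List.foldl_cons, List.foldl_nil, heq]
    by_cases hmatch : PySem.Str.isIn char (garbage.getD m "") = true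
    · rw [lastA_succ, if_pos hmatch]
      refine ⟨by omega, ?_⟩
      simp only [hmatch, if_pos]
      rw [seekTimeWhile_eq travel (m - lastA garbage char m) m (lastA garbage char m) _ rfl hle]
      rw [cntA_succ garbage char m (by omega)]
      simp only [Prod.mk.injEq]
      refine ⟨trivial, by ring⟩
    · rw [lastA_succ, if_neg hmatch]
      refine ⟨by omega, ?_⟩
      simp only [hmatch, Bool.false_eq_true, if_false]
      rw [cntA_succ garbage char m (by omega),
          count_eq_zero_of_not_isIn _ _ (by simpa using hmatch)]
      simp

theorem lastB_eq (garbage : List String) (char : String) :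
    ∀ n, n ≤ garbage.length →
      (PySem.List.enumerate (garbage.take n)).foldl
          (fun l p => if PySem.Str.isIn char p.2 then p.1 else l) 0
        = ((lastA garbage char n : Nat) : Int) := by
  intro n
  induction n with
  | zero => intro _; simp [lastA, PySem.List.enumerate_nil]
  | succ m ih =>
    intro hm
    have hlen : (garbage.take m).length = m := by
      rw [List.length_take]; omega
    rw [List.take_add_one, List.getElem?_eq_getElem (by omega : m < garbage.length)]
    simp only [Option.toList_some]
    rw [PySem.List.enumerate_append, List.foldl_append, ih (by omega)]
    rw [PySem.List.enumerate_cons, PySem.List.enumerate_nil, hlen]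
    simp only [List.foldl_cons, List.foldl_nil]
    rw [lastA_succ]
    rw [List.getD_eq_getElem?_getD, List.getElem?_eq_getElem (by omega : m < garbage.length)]
    simp only [Option.getD_some]
    split <;> simp

-- ===== VERDICT (by name: the statement is the Claim_ definition above) =====
theorem seekTime_spec : Claim_equal_seekTime := by
  intro garbage travel char _ _
  unfold Spec_seekTime seekTime seekTime_alt
  obtain ⟨-, heq⟩ := foldA_eq garbage travel char garbage.length (le_refl _)
  rw [heq]
  have hB := lastB_eq garbage char garbage.length (le_refl _)
  rw [List.take_length] at hB
  simp only [hB, PySem.List.slice_to_natCast]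
  unfold cntA
  rw [List.take_length]
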